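-- pv_equiv track=rewrite | github.com/S-Tarr/Quinto | quinto.py | horizontalTotal
-- ===== SOURCE A (Python) =====
-- def horizontalTotal(i, j, val, newBoard):
--     n, m = i, j
--     currSum = val
--     length = 1
--     while m-1 >= 0 and newBoard[n][m-1] != -1:
--         currSum += newBoard[n][m-1]
--         m-=1
--         length += 1
--     n, m = i, j
--     while m+1 < len(newBoard[n]) and newBoard[n][m+1] != -1:
--         currSum += newBoard[n][m+1]
--         m+=1
--         length += 1
--     return currSum, length
-- ===== SOURCE B (Python) =====
-- def horizontalTotal(i, j, val, newBoard):
--     row = newBoard[i]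
--     blocks = [k for k, x in enumerate(row) if x == -1]
--     start = max((k + 1 for k in blocks if k < j), default=0)
--     end = min((k - 1 for k in blocks if k > j), default=len(row) - 1)
--     left, right = row[start:j], row[j + 1:end + 1]
--     return val + sum(left) + sum(right), len(left) + len(right) + 1
-- ===== Notes on version B (the rewrite author's own statement) =====
-- stated objective: alternative
-- what changed: B never walks outward from j: it collects the -1 sentinel positions of the row in a single enumerate pass, derives the run's boundaries as max/min over those positions, and returns slice sums and slice lengths, replacing A's two directional accumulating scans.
-- outside the precondition, e.g. on horizontalTotal(0, -1, 5, [[2, 3]]): A returns (10, 3), B returns (12, 4); on horizontalTotal(0, -2, 1, [[4, 7, 9]]): A returns (30, 5), B returns (14, 3)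
import Mathlib
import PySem

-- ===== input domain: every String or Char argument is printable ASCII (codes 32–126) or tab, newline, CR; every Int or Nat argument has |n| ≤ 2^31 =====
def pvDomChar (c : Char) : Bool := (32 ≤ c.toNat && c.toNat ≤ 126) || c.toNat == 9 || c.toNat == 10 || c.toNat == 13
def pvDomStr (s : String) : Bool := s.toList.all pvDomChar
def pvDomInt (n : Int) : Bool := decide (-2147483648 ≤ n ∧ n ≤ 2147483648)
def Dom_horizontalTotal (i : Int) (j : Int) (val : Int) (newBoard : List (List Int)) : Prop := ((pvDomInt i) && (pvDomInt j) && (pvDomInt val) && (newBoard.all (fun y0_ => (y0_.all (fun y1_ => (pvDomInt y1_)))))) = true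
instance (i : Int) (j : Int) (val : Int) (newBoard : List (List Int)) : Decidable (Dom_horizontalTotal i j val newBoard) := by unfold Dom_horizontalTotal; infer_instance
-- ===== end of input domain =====

-- B collects the -1 sentinel positions of the row in one enumerate pass, derives the run's
-- boundaries as a max/min over them and returns slice sums/lengths, instead of A's two
-- directional walks outward from j; same cost, different algorithm. No argument is mutated.

-- ===== PORT A =====
-- first while loop of A: scan left accumulating currSum and length (fuel = m.toNat is exact)
def pvALeft (row : List Int) : Nat → Int → Int → Int → Int × Int
  | 0, _, cs, len => (cs, len)
  | fuel+1, m, cs, len =>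
    if m - 1 ≥ 0 ∧ PySem.List.pyGetD row (m-1) 0 ≠ -1 then
      pvALeft row fuel (m-1) (cs + PySem.List.pyGetD row (m-1) 0) (len+1)
    else (cs, len)

-- second while loop of A: scan right accumulating currSum and length (fuel = (len row - m).toNat is exact)
def pvARight (row : List Int) : Nat → Int → Int → Int → Int × Int
  | 0, _, cs, len => (cs, len)
  | fuel+1, m, cs, len =>
    if m + 1 < (row.length : Int) ∧ PySem.List.pyGetD row (m+1) 0 ≠ -1 then
      pvARight row fuel (m+1) (cs + PySem.List.pyGetD row (m+1) 0) (len+1)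
    else (cs, len)

def horizontalTotal (i : Int) (j : Int) (val : Int) (newBoard : List (List Int)) : Int × Int :=
  let row := PySem.List.pyGetD newBoard i []
  let p := pvALeft row j.toNat j val 1
  pvARight row ((row.length : Int) - j).toNat j p.1 p.2

-- ===== PORT B =====
def horizontalTotal_alt (i : Int) (j : Int) (val : Int) (newBoard : List (List Int)) : Int × Int :=
  let row := PySem.List.pyGetD newBoard i []
  let blocks := ((PySem.List.enumerate row).filter (fun p => p.2 == -1)).map (fun p => p.1)
  let start := (PySem.List.max? ((blocks.filter (fun k => k < j)).map (fun k => k + 1)) (fun x => x)).getD 0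
  let e := (PySem.List.min? ((blocks.filter (fun k => j < k)).map (fun k => k - 1)) (fun x => x)).getD ((row.length : Int) - 1)
  let left := PySem.List.slice row (some start) (some j)
  let right := PySem.List.slice row (some (j + 1)) (some (e + 1))
  (val + left.sum + right.sum, (left.length : Int) + (right.length : Int) + 1)

-- ===== PRECONDITION & SPEC =====
-- Pre_ excludes i out of range and j > len(row) (A raises IndexError there) and negative j,
-- which lies outside the board-coordinate domain (A's right scan then reads cells through
-- Python's negative-index wraparound); j = len(row) is kept, A returns normally there.
def Pre_horizontalTotal (i : Int) (j : Int) (val : Int) (newBoard : List (List Int)) : Prop :=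
  -(newBoard.length : Int) ≤ i ∧ i < (newBoard.length : Int) ∧
  0 ≤ j ∧ j ≤ ((PySem.List.pyGetD newBoard i []).length : Int)
instance (i : Int) (j : Int) (val : Int) (newBoard : List (List Int)) : Decidable (Pre_horizontalTotal i j val newBoard) := by unfold Pre_horizontalTotal; infer_instance

def pvWitness_horizontalTotal : Int × Int × Int × List (List Int) := (0, 1, 5, [[2, 3, -1, 4]])

def Spec_horizontalTotal (i : Int) (j : Int) (val : Int) (newBoard : List (List Int)) (out : Int × Int) : Prop := out = horizontalTotal_alt i j val newBoard
instance (i : Int) (j : Int) (val : Int) (newBoard : List (List Int)) (out : Int × Int) : Decidable (Spec_horizontalTotal i j val newBoard out) := by unfold Spec_horizontalTotal; infer_instance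

-- ===== CLAIM (what is proved, stated in full; the proofs are below) =====
def Claim_equal_horizontalTotal : Prop := ∀ (i : Int) (j : Int) (val : Int) (newBoard : List (List Int)), Dom_horizontalTotal i j val newBoard → Pre_horizontalTotal i j val newBoard → Spec_horizontalTotal i j val newBoard (horizontalTotal i j val newBoard)

-- ===== LEMMAS AND PROOFS =====

-- proof-side helpers: index-only versions of A's two scans
def pvBScanL (row : List Int) : Nat → Int → Int
  | 0, s => s
  | fuel+1, s =>
    if s - 1 ≥ 0 ∧ PySem.List.pyGetD row (s-1) 0 ≠ -1 then pvBScanL row fuel (s-1) else s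

def pvBScanR (row : List Int) : Nat → Int → Int
  | 0, e => e
  | fuel+1, e =>
    if e + 1 < (row.length : Int) ∧ PySem.List.pyGetD row (e+1) 0 ≠ -1 then pvBScanR row fuel (e+1) else e

def pvSum (row : List Int) (a b : Int) : Int :=
  ((PySem.List.pyRange a b 1).map (fun t => PySem.List.pyGetD row t 0)).sum

-- "no sentinel in [a, b)"
def pvNoBlk (row : List Int) (a b : Int) : Prop :=
  ∀ t : Int, a ≤ t → t < b → PySem.List.pyGetD row t 0 ≠ -1

-- the characterization of the left boundary of the run through j
def pvStartSpec (row : List Int) (j s : Int) : Prop :=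
  0 ≤ s ∧ s ≤ j ∧ pvNoBlk row s j ∧ (s = 0 ∨ PySem.List.pyGetD row (s-1) 0 = -1)

-- the characterization of the right boundary (only used when j < len row)
def pvEndSpec (row : List Int) (j e : Int) : Prop :=
  j ≤ e ∧ e ≤ (row.length : Int) - 1 ∧ pvNoBlk row (j+1) (e+1) ∧
  (¬ (e + 1 < (row.length : Int)) ∨ PySem.List.pyGetD row (e+1) 0 = -1)

theorem pvStartSpec_unique {row : List Int} {j s1 s2 : Int}
    (h1 : pvStartSpec row j s1) (h2 : pvStartSpec row j s2) : s1 = s2 := by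
  obtain ⟨h10, h1j, h1n, h1s⟩ := h1
  obtain ⟨h20, h2j, h2n, h2s⟩ := h2
  rcases lt_trichotomy s1 s2 with h | h | h
  · rcases h2s with h2s | h2s
    · omega
    · exact absurd h2s (h1n (s2 - 1) (by omega) (by omega))
  · exact h
  · rcases h1s with h1s | h1s
    · omega
    · exact absurd h1s (h2n (s1 - 1) (by omega) (by omega))

theorem pvEndSpec_unique {row : List Int} {j e1 e2 : Int}
    (h1 : pvEndSpec row j e1) (h2 : pvEndSpec row j e2) : e1 = e2 := by
  obtain ⟨h1j, h1L, h1n, h1s⟩ := h1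
  obtain ⟨h2j, h2L, h2n, h2s⟩ := h2
  rcases lt_trichotomy e1 e2 with h | h | h
  · rcases h1s with h1s | h1s
    · omega
    · exact absurd h1s (h2n (e1 + 1) (by omega) (by omega))
  · exact h
  · rcases h2s with h2s | h2s
    · omega
    · exact absurd h2s (h1n (e2 + 1) (by omega) (by omega))

theorem pvBScanL_le (row : List Int) : ∀ (fuel : Nat) (m : Int), pvBScanL row fuel m ≤ m := by
  intro fuel
  induction fuel with
  | zero => intro m; simp [pvBScanL]
  | succ n ih =>
    intro m
    simp only [pvBScanL]
    split
    · exact le_trans (ih (m-1)) (by omega)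
    · exact le_refl m

theorem pvBScanR_ge (row : List Int) : ∀ (fuel : Nat) (m : Int), m ≤ pvBScanR row fuel m := by
  intro fuel
  induction fuel with
  | zero => intro m; simp [pvBScanR]
  | succ n ih =>
    intro m
    simp only [pvBScanR]
    split
    · exact le_trans (by omega) (ih (m+1))
    · exact le_refl m

theorem pvSum_nil (row : List Int) (a b : Int) (h : b ≤ a) : pvSum row a b = 0 := by
  simp [pvSum, PySem.List.pyRange_one_eq_nil h]

theorem pvSum_succ_right (row : List Int) (a b : Int) (h : a ≤ b) :
    pvSum row a (b+1) = pvSum row a b + PySem.List.pyGetD row b 0 := by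
  simp [pvSum, PySem.List.pyRange_one_succ_right h]

theorem pvSum_cons (row : List Int) (a b : Int) (h : a < b) :
    pvSum row a b = PySem.List.pyGetD row a 0 + pvSum row (a+1) b := by
  simp [pvSum, PySem.List.pyRange_one_cons h]

theorem pvALeft_eq (row : List Int) : ∀ (fuel : Nat) (m cs len : Int),
    pvALeft row fuel m cs len =
      (cs + pvSum row (pvBScanL row fuel m) m, len + (m - pvBScanL row fuel m)) := by
  intro fuel
  induction fuel with
  | zero => intro m cs len; simp [pvALeft, pvBScanL, pvSum_nil row m m le_rfl]
  | succ n ih =>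
    intro m cs len
    simp only [pvALeft, pvBScanL]
    split
    · rw [ih]
      have hle : pvBScanL row n (m-1) ≤ m - 1 := pvBScanL_le row n (m-1)
      have : pvSum row (pvBScanL row n (m-1)) m
          = pvSum row (pvBScanL row n (m-1)) (m-1) + PySem.List.pyGetD row (m-1) 0 := by
        have := pvSum_succ_right row (pvBScanL row n (m-1)) (m-1) hle
        simpa using this
      rw [this]
      simp only [Prod.mk.injEq]
      constructor <;> ring
    · simp [pvSum_nil row m m le_rfl]

theorem pvARight_eq (row : List Int) : ∀ (fuel : Nat) (m cs len : Int),
    pvARight row fuel m cs len =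
      (cs + pvSum row (m+1) (pvBScanR row fuel m + 1), len + (pvBScanR row fuel m - m)) := by
  intro fuel
  induction fuel with
  | zero => intro m cs len; simp [pvARight, pvBScanR, pvSum_nil row (m+1) (m+1) le_rfl]
  | succ n ih =>
    intro m cs len
    simp only [pvARight, pvBScanR]
    split
    · rw [ih]
      have hge : m + 1 ≤ pvBScanR row n (m+1) := pvBScanR_ge row n (m+1)
      have : pvSum row (m+1) (pvBScanR row n (m+1) + 1)
          = PySem.List.pyGetD row (m+1) 0 + pvSum row (m+1+1) (pvBScanR row n (m+1) + 1) :=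
        pvSum_cons row (m+1) (pvBScanR row n (m+1) + 1) (by omega)
      rw [this]
      simp only [Prod.mk.injEq]
      constructor <;> ring
    · simp [pvSum_nil row (m+1) (m+1) le_rfl]

-- A's left scan reaches the characterized left boundary
theorem pvBScanL_spec (row : List Int) : ∀ (fuel : Nat) (m : Int), 0 ≤ m → m.toNat ≤ fuel →
    pvStartSpec row m (pvBScanL row fuel m) := by
  intro fuel
  induction fuel with
  | zero =>
    intro m h0 hf
    have : m = 0 := by omega
    subst this
    simp only [pvBScanL]
    exact ⟨le_rfl, le_rfl, fun t ht1 ht2 => by omega, Or.inl rfl⟩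
  | succ n ih =>
    intro m h0 hf
    simp only [pvBScanL]
    split
    · rename_i hc
      have h1 : 0 ≤ m - 1 := by omega
      have h2 : (m - 1).toNat ≤ n := by omega
      obtain ⟨q0, qj, qn, qs⟩ := ih (m-1) h1 h2
      refine ⟨q0, by omega, ?_, qs⟩
      intro t ht1 ht2
      by_cases ht : t < m - 1
      · exact qn t ht1 ht
      · have : t = m - 1 := by omega
        subst this
        exact hc.2
    · rename_i hc
      push_neg at hc
      refine ⟨h0, le_rfl, fun t ht1 ht2 => by omega, ?_⟩
      by_cases hm : m = 0
      · exact Or.inl hm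
      · exact Or.inr (hc (by omega))

-- A's right scan reaches the characterized right boundary (plus: it moved only below len row)
theorem pvBScanR_spec (row : List Int) : ∀ (fuel : Nat) (m : Int),
    ((row.length : Int) - m).toNat ≤ fuel →
    (m ≤ pvBScanR row fuel m ∧
     pvNoBlk row (m+1) (pvBScanR row fuel m + 1) ∧
     (¬ (pvBScanR row fuel m + 1 < (row.length : Int)) ∨ PySem.List.pyGetD row (pvBScanR row fuel m + 1) 0 = -1) ∧
     (pvBScanR row fuel m = m ∨ pvBScanR row fuel m < (row.length : Int))) := by
  intro fuel
  induction fuel with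
  | zero =>
    intro m hf
    have he : pvBScanR row 0 m = m := rfl
    rw [he]
    exact ⟨le_rfl, fun t ht1 ht2 => by omega, Or.inl (by omega), Or.inl rfl⟩
  | succ n ih =>
    intro m hf
    simp only [pvBScanR]
    split
    · rename_i hc
      have h2 : ((row.length : Int) - (m+1)).toNat ≤ n := by omega
      obtain ⟨q1, q2, q3, q4⟩ := ih (m+1) h2
      refine ⟨by omega, ?_, q3, by omega⟩
      intro t ht1 ht2
      by_cases ht : m + 1 + 1 ≤ t
      · exact q2 t ht ht2
      · have : t = m + 1 := by omega
        subst this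
        exact hc.2
    · rename_i hc
      push_neg at hc
      refine ⟨le_rfl, fun t ht1 ht2 => by omega, ?_, Or.inl rfl⟩
      by_cases hm : m + 1 < (row.length : Int)
      · exact Or.inr (hc hm)
      · exact Or.inl hm

-- membership in B's sentinel-position list
theorem pvMem_blocks (row : List Int) (k : Int) :
    k ∈ ((PySem.List.enumerate row).filter (fun p => p.2 == -1)).map (fun p => p.1) ↔
    (0 ≤ k ∧ k < (row.length : Int) ∧ PySem.List.pyGetD row k 0 = -1) := by
  simp only [List.mem_map, List.mem_filter, PySem.List.mem_enumerate_iff]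
  constructor
  · rintro ⟨p, ⟨⟨n, hn, rfl⟩, hb⟩, rfl⟩
    simp only [beq_iff_eq] at hb
    refine ⟨by omega, by omega, ?_⟩
    rw [PySem.List.pyGetD_eq_getElem row 0 (by omega) (by omega)]
    simpa using hb
  · rintro ⟨h0, hL, hv⟩
    refine ⟨(k, -1), ⟨⟨k.toNat, by omega, ?_⟩, by simp⟩, rfl⟩
    rw [PySem.List.pyGetD_eq_getElem row 0 h0 hL] at hv
    simp [hv, Int.toNat_of_nonneg h0]

-- B's left boundary satisfies the characterization
theorem pvStartB_spec (row : List Int) (j : Int) (h0 : 0 ≤ j) (hj : j ≤ (row.length : Int)) :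
    pvStartSpec row j
      ((PySem.List.max? (((((PySem.List.enumerate row).filter (fun p => p.2 == -1)).map (fun p => p.1)).filter (fun k => k < j)).map (fun k => k + 1)) (fun x => x)).getD 0) := by
  set blocks := ((PySem.List.enumerate row).filter (fun p => p.2 == -1)).map (fun p => p.1) with hblocks
  set cands := (blocks.filter (fun k => k < j)).map (fun k => k + 1) with hcands
  have hmem : ∀ x : Int, x ∈ cands ↔ ∃ k : Int, (0 ≤ k ∧ k < (row.length : Int) ∧ PySem.List.pyGetD row k 0 = -1) ∧ k < j ∧ x = k + 1 := by
    intro x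
    simp only [hcands, List.mem_map, List.mem_filter, decide_eq_true_eq]
    constructor
    · rintro ⟨k, ⟨hk, hkj⟩, rfl⟩
      exact ⟨k, (pvMem_blocks row k).mp hk, hkj, rfl⟩
    · rintro ⟨k, hk, hkj, rfl⟩
      exact ⟨k, ⟨(pvMem_blocks row k).mpr hk, hkj⟩, rfl⟩
  rcases hM : PySem.List.max? cands (fun x => x) with _ | m
  · have hnil : cands = [] := (PySem.List.max?_eq_none_iff cands _).mp hM
    simp only [Option.getD_none]
    refine ⟨le_rfl, h0, ?_, Or.inl rfl⟩
    intro t ht1 ht2 hv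
    have : (t + 1) ∈ cands := (hmem (t+1)).mpr ⟨t, ⟨ht1, by omega, hv⟩, ht2, rfl⟩
    rw [hnil] at this
    simp at this
  · obtain ⟨k, ⟨hk0, hkL, hkv⟩, hkj, hm⟩ := (hmem m).mp (PySem.List.max?_mem hM)
    subst hm
    simp only [Option.getD_some]
    refine ⟨by omega, by omega, ?_, Or.inr (by simpa using hkv)⟩
    intro t ht1 ht2 hv
    have hmx := PySem.List.max?_isMax hM (t + 1) ((hmem (t+1)).mpr ⟨t, ⟨by omega, by omega, hv⟩, ht2, rfl⟩)
    simp only at hmx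
    omega

-- B's right boundary satisfies the characterization (needs j < len row)
theorem pvEndB_spec (row : List Int) (j : Int) (h0 : 0 ≤ j) (hj : j < (row.length : Int)) :
    pvEndSpec row j
      ((PySem.List.min? (((((PySem.List.enumerate row).filter (fun p => p.2 == -1)).map (fun p => p.1)).filter (fun k => j < k)).map (fun k => k - 1)) (fun x => x)).getD ((row.length : Int) - 1)) := by
  set blocks := ((PySem.List.enumerate row).filter (fun p => p.2 == -1)).map (fun p => p.1) with hblocks
  set cands := (blocks.filter (fun k => j < k)).map (fun k => k - 1) with hcands
  have hmem : ∀ x : Int, x ∈ cands ↔ ∃ k : Int, (0 ≤ k ∧ k < (row.length : Int) ∧ PySem.List.pyGetD row k 0 = -1) ∧ j < k ∧ x = k - 1 := by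
    intro x
    simp only [hcands, List.mem_map, List.mem_filter, decide_eq_true_eq]
    constructor
    · rintro ⟨k, ⟨hk, hkj⟩, rfl⟩
      exact ⟨k, (pvMem_blocks row k).mp hk, hkj, rfl⟩
    · rintro ⟨k, hk, hkj, rfl⟩
      exact ⟨k, ⟨(pvMem_blocks row k).mpr hk, hkj⟩, rfl⟩
  rcases hM : PySem.List.min? cands (fun x => x) with _ | m
  · have hnil : cands = [] := by
      rcases List.eq_nil_or_concat cands with h | ⟨l, a, h⟩
      · exact h
      · exfalso
        have : ∃ y, y ∈ cands := ⟨a, by simp [h]⟩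
        obtain ⟨y, hy⟩ := this
        rcases hmy : PySem.List.min? cands (fun x => x) with _ | _
        · -- min? is none on a nonempty list: contradiction via min?_eq_none_iff analogue
          have := (PySem.List.min?_eq_none_iff cands (fun x : Int => x)).mp hmy
          rw [this] at hy; simp at hy
        · rw [hM] at hmy; exact absurd hmy (by simp)
    simp only [Option.getD_none]
    refine ⟨by omega, le_rfl, ?_, Or.inl (by omega)⟩
    intro t ht1 ht2 hv
    have : (t - 1) ∈ cands := (hmem (t-1)).mpr ⟨t, ⟨by omega, by omega, hv⟩, by omega, rfl⟩
    rw [hnil] at this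
    simp at this
  · obtain ⟨k, ⟨hk0, hkL, hkv⟩, hkj, hm⟩ := (hmem m).mp (PySem.List.min?_mem hM)
    subst hm
    simp only [Option.getD_some]
    refine ⟨by omega, by omega, ?_, Or.inr (by simpa using hkv)⟩
    intro t ht1 ht2 hv
    have hmn := PySem.List.min?_isMin hM (t - 1) ((hmem (t-1)).mpr ⟨t, ⟨by omega, by omega, hv⟩, by omega, rfl⟩)
    simp only at hmn
    omega

-- slice sum = pvSum on in-range bounds
theorem pvTakeDropSum (row : List Int) : ∀ (n : Nat) (a : Int), 0 ≤ a → a + n ≤ (row.length : Int) →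
    (List.take n (List.drop a.toNat row)).sum = pvSum row a (a + n) := by
  intro n
  induction n with
  | zero => intro a h0 hL; simp [pvSum_nil row a a le_rfl]
  | succ n ih =>
    intro a h0 hL
    have haL : a.toNat < row.length := by omega
    have hdrop : List.drop a.toNat row = row[a.toNat] :: List.drop (a.toNat + 1) row :=
      (List.drop_eq_getElem_cons haL)
    rw [hdrop, List.take_succ_cons, List.sum_cons]
    have h1 : (a + 1).toNat = a.toNat + 1 := by omega
    have := ih (a + 1) (by omega) (by omega)
    rw [h1] at this
    rw [this]
    have hget : PySem.List.pyGetD row a 0 = row[a.toNat] :=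
      PySem.List.pyGetD_eq_getElem row 0 h0 (by omega)
    rw [pvSum_cons row a (a + (n+1 : Nat)) (by push_cast; omega), hget]
    have : a + 1 + (n : Int) = a + ((n : Nat) + 1 : Nat) := by push_cast; ring
    rw [← this]

-- bounds on B's right-boundary value (used in the j = len row case)
theorem pvEndB_bounds (row : List Int) (j : Int) :
    -1 ≤ ((PySem.List.min? (((((PySem.List.enumerate row).filter (fun p => p.2 == -1)).map (fun p => p.1)).filter (fun k => j < k)).map (fun k => k - 1)) (fun x : Int => x)).getD ((row.length : Int) - 1)) ∧
    ((PySem.List.min? (((((PySem.List.enumerate row).filter (fun p => p.2 == -1)).map (fun p => p.1)).filter (fun k => j < k)).map (fun k => k - 1)) (fun x : Int => x)).getD ((row.length : Int) - 1)) ≤ (row.length : Int) - 1 := by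
  set blocks := ((PySem.List.enumerate row).filter (fun p => p.2 == -1)).map (fun p => p.1) with hblocks
  rcases hM : PySem.List.min? ((blocks.filter (fun k => j < k)).map (fun k => k - 1)) (fun x : Int => x) with _ | m
  · simp only [Option.getD_none]
    omega
  · have hmm := PySem.List.min?_mem hM
    obtain ⟨k, hkf, rfl⟩ := List.mem_map.mp hmm
    have hkb : k ∈ blocks := (List.mem_filter.mp hkf).1
    have := (pvMem_blocks row k).mp hkb
    simp only [Option.getD_some]
    omega

-- ===== VERDICT (by name: the statement is the Claim_ definition above) =====
theorem horizontalTotal_spec : Claim_equal_horizontalTotal := by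
  intro i j val newBoard _ hpre
  obtain ⟨_, _, hj0, hjL⟩ := hpre
  unfold Spec_horizontalTotal horizontalTotal horizontalTotal_alt
  set row := PySem.List.pyGetD newBoard i [] with hrow
  simp only [pvALeft_eq, pvARight_eq]
  -- left boundary: A's scan equals B's max formula
  set sA := pvBScanL row j.toNat j with hsA
  set sB := ((PySem.List.max? (((((PySem.List.enumerate row).filter (fun p => p.2 == -1)).map (fun p => p.1)).filter (fun k => k < j)).map (fun k => k + 1)) (fun x => x)).getD 0) with hsB
  have hSs : sA = sB :=
    pvStartSpec_unique (pvBScanL_spec row j.toNat j hj0 le_rfl) (pvStartB_spec row j hj0 hjL)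
  have hsA0 : 0 ≤ sA := (pvBScanL_spec row j.toNat j hj0 le_rfl).1
  have hsAj : sA ≤ j := (pvBScanL_spec row j.toNat j hj0 le_rfl).2.1
  -- left slice: sum and length
  have hleft : PySem.List.slice row (some sB) (some j) = List.take (j.toNat - sB.toNat) (List.drop sB.toNat row) :=
    PySem.List.slice_toNat row (by omega) hj0
  have hleftsum : (PySem.List.slice row (some sB) (some j)).sum = pvSum row sA j := by
    rw [hleft, ← hSs]
    have hn : (j.toNat - sA.toNat : Nat) = (j - sA).toNat := by omega
    rw [hn]
    have := pvTakeDropSum row (j - sA).toNat sA hsA0 (by omega)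
    rw [this]
    congr 1
    omega
  have hleftlen : ((PySem.List.slice row (some sB) (some j)).length : Int) = j - sA := by
    rw [hleft, ← hSs, List.length_take, List.length_drop]
    omega
  -- right boundary
  set eA := pvBScanR row ((row.length : Int) - j).toNat j with heA
  set eB := ((PySem.List.min? (((((PySem.List.enumerate row).filter (fun p => p.2 == -1)).map (fun p => p.1)).filter (fun k => j < k)).map (fun k => k - 1)) (fun x => x)).getD ((row.length : Int) - 1)) with heB
  obtain ⟨hq1, hq2, hq3, hq4⟩ := pvBScanR_spec row ((row.length : Int) - j).toNat j le_rfl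
  rcases lt_or_eq_of_le hjL with hjlt | hjeq
  · -- j < len row: boundaries coincide
    have hEe : eA = eB := by
      refine pvEndSpec_unique ⟨hq1, by omega, hq2, hq3⟩ (pvEndB_spec row j hj0 hjlt)
    have hbnd := pvEndB_bounds row j
    rw [← heB] at hbnd
    have heB0 : 0 ≤ eB + 1 := by omega
    have hright : PySem.List.slice row (some (j+1)) (some (eB+1)) = List.take ((eB+1).toNat - (j+1).toNat) (List.drop (j+1).toNat row) :=
      PySem.List.slice_toNat row (by omega) heB0
    have hjeB : j ≤ eB := by rw [← hEe]; omega
    have hrightsum : (PySem.List.slice row (some (j+1)) (some (eB+1))).sum = pvSum row (j+1) (eA+1) := by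
      rw [hright, hEe]
      have hn : ((eB+1).toNat - (j+1).toNat : Nat) = (eB - j).toNat := by omega
      rw [hn]
      have := pvTakeDropSum row (eB - j).toNat (j+1) (by omega) (by omega)
      rw [this]
      congr 1
      omega
    have hrightlen : ((PySem.List.slice row (some (j+1)) (some (eB+1))).length : Int) = eA - j := by
      rw [hright, hEe, List.length_take, List.length_drop]
      omega
    simp only [Prod.mk.injEq]
    rw [hleftsum, hleftlen, hrightsum, hrightlen]
    constructor <;> ring
  · -- j = len row: both right parts are empty
    have heAeq : eA = j := by
      rcases hq4 with h | h
      · exact h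
      · omega
    have hbnd := pvEndB_bounds row j
    rw [← heB] at hbnd
    have heB0 : 0 ≤ eB + 1 := by omega
    have hright : PySem.List.slice row (some (j+1)) (some (eB+1)) = List.take ((eB+1).toNat - (j+1).toNat) (List.drop (j+1).toNat row) :=
      PySem.List.slice_toNat row (by omega) heB0
    have hempty : PySem.List.slice row (some (j+1)) (some (eB+1)) = [] := by
      rw [hright]
      have : ((eB+1).toNat - (j+1).toNat : Nat) = 0 := by omega
      rw [this]
      simp
    simp only [Prod.mk.injEq]
    rw [hempty, heAeq]
    rw [hleftsum, hleftlen]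
    rw [pvSum_nil row (j+1) (j+1) le_rfl]
    simp only [List.sum_nil, List.length_nil]
    exact ⟨trivial, by omega⟩
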